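-- pv_equiv track=rewrite | github.com/LANSGANBS/nihon-vocab-trainer | vocab_v4.0.0.py | _rank_strings
-- ===== SOURCE A (Python) =====
-- def _rank_strings(all_list, q: str):
--     q = (q or "").strip()
--     if not q:
--         return all_list[:]
--     exact = []
--     prefix = []
--     contain = []
--     others = []
--     q_low = q.lower()
--     seen = set()
--     for s in all_list:
--         if not s:
--             continue
--         key = s  # 保持大小写/原样
--         if key in seen:
--             continue
--         seen.add(key)
--         s_low = s.lower()
--         if s_low == q_low:
--             exact.append(s)
--         elif s_low.startswith(q_low):
--             prefix.append(s)
--         elif q_low in s_low: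
--             contain.append(s)
--         else:
--             others.append(s)
--     return exact + prefix + contain + others
-- ===== SOURCE B (Python) =====
-- def _rank_strings(all_list, q: str):
--     q = (q or "").strip()
--     if not q:
--         return all_list[:]
--     ql = q.lower()
--
--     def rank(s):
--         sl = s.lower()
--         if sl == ql:
--             return 0
--         if sl.startswith(ql):
--             return 1
--         if ql in sl:
--             return 2
--         return 3
--
--     kept = list(dict.fromkeys(s for s in all_list if s))
--     return [s for r in range(4) for s in kept if rank(s) == r]
-- ===== Notes on version B (the rewrite author's own statement) =====
-- stated objective: simpler
-- what changed: Replaces A's one-pass loop maintaining a seen-set and four explicit accumulator lists by an ordered dedup via dict.fromkeys followed by a rank function and four rank-filter passes concatenated by a comprehension.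
import Mathlib
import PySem

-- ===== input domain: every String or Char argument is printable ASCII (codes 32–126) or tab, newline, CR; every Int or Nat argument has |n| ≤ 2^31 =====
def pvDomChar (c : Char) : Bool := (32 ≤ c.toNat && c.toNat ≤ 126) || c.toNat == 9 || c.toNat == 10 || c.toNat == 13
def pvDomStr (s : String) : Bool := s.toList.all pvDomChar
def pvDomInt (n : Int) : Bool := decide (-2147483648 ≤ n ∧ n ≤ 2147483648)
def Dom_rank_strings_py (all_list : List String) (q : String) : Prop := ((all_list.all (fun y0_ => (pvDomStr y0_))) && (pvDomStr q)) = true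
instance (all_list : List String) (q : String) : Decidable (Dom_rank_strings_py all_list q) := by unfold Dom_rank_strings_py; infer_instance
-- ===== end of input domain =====

-- B changes A's one-pass four-accumulator loop into dedup-then-four-rank-filters (simpler); same return value.

-- ===== PORT A =====
-- the loop of A: carries the seen-set and the four buckets; appends to the chosen bucket
def rankLoopA (ql : String) (seen : PySem.Set String)
    (exact prefx contain others : List String) : List String → List String
  | [] => exact ++ prefx ++ contain ++ others
  | s :: rest =>
    if s = "" then rankLoopA ql seen exact prefx contain others rest
    else if PySem.Set.contains seen s then rankLoopA ql seen exact prefx contain others rest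
    else
      let seen' := PySem.Set.add seen s
      let sl := PySem.Str.lower s
      if sl = ql then rankLoopA ql seen' (exact ++ [s]) prefx contain others rest
      else if PySem.Str.startswith sl ql then rankLoopA ql seen' exact (prefx ++ [s]) contain others rest
      else if PySem.Str.isIn ql sl then rankLoopA ql seen' exact prefx (contain ++ [s]) others rest
      else rankLoopA ql seen' exact prefx contain (others ++ [s]) rest

def rank_strings_py (all_list : List String) (q : String) : List String :=
  let q := PySem.Str.strip q
  if q = "" then all_list
  else rankLoopA (PySem.Str.lower q) PySem.Set.empty [] [] [] [] all_list

-- ===== PORT B =====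
def rankOf (ql : String) (s : String) : Int :=
  let sl := PySem.Str.lower s
  if sl = ql then 0
  else if PySem.Str.startswith sl ql then 1
  else if PySem.Str.isIn ql sl then 2
  else 3

def rank_strings_py_alt (all_list : List String) (q : String) : List String :=
  let q := PySem.Str.strip q
  if q = "" then all_list
  else
    let ql := PySem.Str.lower q
    let kept := PySem.List.dedup (all_list.filter (fun s => decide (s ≠ "")))
    (PySem.List.pyRange 0 4 1).flatMap (fun r => kept.filter (fun s => decide (rankOf ql s = r)))

-- ===== PRECONDITION & SPEC =====
def Spec_rank_strings_py (all_list : List String) (q : String) (out : List String) : Prop := out = rank_strings_py_alt all_list q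
instance (all_list : List String) (q : String) (out : List String) : Decidable (Spec_rank_strings_py all_list q out) := by unfold Spec_rank_strings_py; infer_instance

-- ===== CLAIM (what is proved, stated in full; the proofs are below) =====
def Claim_equal_rank_strings_py : Prop := ∀ (all_list : List String) (q : String), Dom_rank_strings_py all_list q → Spec_rank_strings_py all_list q (rank_strings_py all_list q)

-- ===== LEMMAS AND PROOFS =====

-- the non-empty, not-yet-seen first occurrences of l, in order
def fresh (seen : List String) : List String → List String
  | [] => []
  | s :: t => if s = "" ∨ s ∈ seen then fresh seen t else s :: fresh (PySem.Set.add seen s) t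

lemma update_filter_eq_fresh (l : List String) : ∀ seen : List String,
    PySem.Set.update seen (l.filter (fun s => decide (s ≠ ""))) = seen ++ fresh seen l := by
  induction l with
  | nil => intro seen; simp [PySem.Set.update, fresh]
  | cons s t ih =>
    intro seen
    by_cases hs : s = ""
    · simpa [hs, fresh] using ih seen
    · by_cases hm : s ∈ seen
      · have := ih seen
        simp [PySem.Set.update] at this
        simp [hs, hm, fresh, PySem.Set.update, this]
      · have := ih (seen ++ [s])
        simp [PySem.Set.update] at this
        simp [hs, hm, fresh, PySem.Set.update, this]

lemma loop_eq (ql : String) (l : List String) : ∀ (seen : List String) (e p c o : List String),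
    rankLoopA ql seen e p c o l =
      e ++ (fresh seen l).filter (fun s => decide (rankOf ql s = 0)) ++
      (p ++ (fresh seen l).filter (fun s => decide (rankOf ql s = 1)) ++
      (c ++ (fresh seen l).filter (fun s => decide (rankOf ql s = 2)) ++
      (o ++ (fresh seen l).filter (fun s => decide (rankOf ql s = 3))))) := by
  induction l with
  | nil => intro seen e p c o; simp [rankLoopA, fresh]
  | cons s t ih =>
    intro seen e p c o
    by_cases hs : s = ""
    · simp [rankLoopA, hs, fresh, ih]
    · by_cases hm : s ∈ seen
      · simp [rankLoopA, hs, PySem.Set.contains, fresh, hm, ih]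
      · by_cases h0 : PySem.Str.lower s = ql
        · simp [rankLoopA, hs, PySem.Set.contains, fresh, hm, h0, rankOf, ih]
        · by_cases h1 : PySem.Chars.startswith (PySem.Chars.lower s.toList) ql.toList = true
          · simp [rankLoopA, hs, PySem.Set.contains, fresh, hm, h0, h1, rankOf, ih]
          · by_cases h2 : PySem.Chars.isIn ql.toList (PySem.Chars.lower s.toList) = true
            · simp [rankLoopA, hs, PySem.Set.contains, fresh, hm, h0, h1, h2, rankOf, ih]
            · simp [rankLoopA, hs, PySem.Set.contains, fresh, hm, h0, h1, h2, rankOf, ih]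

theorem rank_strings_py_spec : Claim_equal_rank_strings_py := by
  intro all_list q _
  unfold Spec_rank_strings_py rank_strings_py rank_strings_py_alt
  by_cases hq : PySem.Str.strip q = ""
  · simp [hq]
  · have hfresh : fresh [] all_list
        = PySem.List.dedup (all_list.filter (fun s => decide (s ≠ ""))) := by
      have := update_filter_eq_fresh all_list []
      simp [PySem.Set.update] at this
      simp [PySem.List.dedup_eq_ofList, PySem.Set.ofList_eq_foldl, ← this]
    have hrange : PySem.List.pyRange 0 4 1 = [0, 1, 2, 3] := by decide
    simp [hq, loop_eq, hrange, List.flatMap, hfresh, PySem.Set.empty]
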